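-- pv_equiv track=rewrite | github.com/luciaperri/Fantacalcio | fantacalcio.py | separa_dati_tabella
-- ===== SOURCE A (Python) =====
-- def separa_dati_tabella(tabella):
--     portieri = []
--     difensori = []
--     centrocampisti = []
--     attaccanti = []
--
--     for calciatore in tabella:
--         ruolo = calciatore[2]
--
--         if ruolo == 'portiere':
--             portieri.append(calciatore)
--         elif ruolo == 'difensore':
--             difensori.append(calciatore)
--         elif ruolo == 'centrocampista':
--             centrocampisti.append(calciatore)
--         elif ruolo == 'attaccante':
--             attaccanti.append(calciatore)
--     ruoli = [portieri, difensori,centrocampisti,attaccanti]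
--     return ruoli
-- ===== SOURCE B (Python) =====
-- def separa_dati_tabella(tabella):
--     ruoli_nomi = ['portiere', 'difensore', 'centrocampista', 'attaccante']
--     return [[calciatore for calciatore in tabella if calciatore[2] == ruolo]
--             for ruolo in ruoli_nomi]
-- ===== Notes on version B (the rewrite author's own statement) =====
-- stated objective: idiomatic
-- what changed: A routes each row once through an if/elif chain into four mutable accumulators; B instead performs four independent filtering passes over the table, one list comprehension per role, returned in the fixed role order.
import Mathlib
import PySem

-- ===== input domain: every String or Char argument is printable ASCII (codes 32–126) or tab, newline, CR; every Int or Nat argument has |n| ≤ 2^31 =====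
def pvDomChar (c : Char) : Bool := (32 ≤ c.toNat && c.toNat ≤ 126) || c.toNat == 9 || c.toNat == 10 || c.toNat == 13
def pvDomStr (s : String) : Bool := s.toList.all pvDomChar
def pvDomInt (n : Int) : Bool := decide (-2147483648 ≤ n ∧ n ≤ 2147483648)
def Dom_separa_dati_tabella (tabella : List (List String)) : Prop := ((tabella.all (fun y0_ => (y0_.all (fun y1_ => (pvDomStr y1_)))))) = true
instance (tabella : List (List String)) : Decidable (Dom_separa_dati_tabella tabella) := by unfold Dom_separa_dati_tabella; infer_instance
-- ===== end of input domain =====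

-- B replaces A's single routing pass (if/elif chain into four accumulators) by four
-- independent per-role filtering passes (one list comprehension per role); return value only.

-- ===== PORT A =====
-- single fold over the table carrying the four accumulator lists, appended in order
def separa_dati_tabella (tabella : List (List String)) : List (List (List String)) :=
  let acc := tabella.foldl
    (fun (acc : List (List String) × List (List String) × List (List String) × List (List String)) calciatore =>
      let ruolo := PySem.List.pyGet? calciatore 2   -- calciatore[2]; none = IndexError, excluded by Pre_
      if ruolo = some "portiere" then (acc.1 ++ [calciatore], acc.2.1, acc.2.2.1, acc.2.2.2)
      else if ruolo = some "difensore" then (acc.1, acc.2.1 ++ [calciatore], acc.2.2.1, acc.2.2.2)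
      else if ruolo = some "centrocampista" then (acc.1, acc.2.1, acc.2.2.1 ++ [calciatore], acc.2.2.2)
      else if ruolo = some "attaccante" then (acc.1, acc.2.1, acc.2.2.1, acc.2.2.2 ++ [calciatore])
      else acc)
    ([], [], [], [])
  [acc.1, acc.2.1, acc.2.2.1, acc.2.2.2]

-- ===== PORT B =====
-- four independent filters, one per role name, in the fixed order
def separa_dati_tabella_alt (tabella : List (List String)) : List (List (List String)) :=
  ["portiere", "difensore", "centrocampista", "attaccante"].map
    (fun ruolo => tabella.filter (fun calciatore => PySem.List.pyGet? calciatore 2 == some ruolo))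

-- ===== PRECONDITION & SPEC =====
-- Pre_ excludes rows shorter than 3, on which both A and B raise IndexError at calciatore[2].
def Pre_separa_dati_tabella (tabella : List (List String)) : Prop :=
  (tabella.all (fun calciatore => 3 ≤ calciatore.length)) = true
instance (tabella : List (List String)) : Decidable (Pre_separa_dati_tabella tabella) := by unfold Pre_separa_dati_tabella; infer_instance
def pvWitness_separa_dati_tabella : List (List String) :=
  [["a", "b", "portiere"], ["c", "d", "esterno"], ["e", "f", "difensore"]]
def Spec_separa_dati_tabella (tabella : List (List String)) (out : List (List (List String))) : Prop := out = separa_dati_tabella_alt tabella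
instance (tabella : List (List String)) (out : List (List (List String))) : Decidable (Spec_separa_dati_tabella tabella out) := by unfold Spec_separa_dati_tabella; infer_instance

-- ===== CLAIM (what is proved, stated in full; the proofs are below) =====
def Claim_equal_separa_dati_tabella : Prop := ∀ (tabella : List (List String)), Dom_separa_dati_tabella tabella → Pre_separa_dati_tabella tabella → Spec_separa_dati_tabella tabella (separa_dati_tabella tabella)

-- ===== LEMMAS AND PROOFS =====

-- invariant of A's fold: each accumulator component ends as its start value ++ the per-role filter
theorem separa_fold_eq (tabella : List (List String))
    (p d c a : List (List String)) :
    tabella.foldl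
      (fun (acc : List (List String) × List (List String) × List (List String) × List (List String)) calciatore =>
        let ruolo := PySem.List.pyGet? calciatore 2
        if ruolo = some "portiere" then (acc.1 ++ [calciatore], acc.2.1, acc.2.2.1, acc.2.2.2)
        else if ruolo = some "difensore" then (acc.1, acc.2.1 ++ [calciatore], acc.2.2.1, acc.2.2.2)
        else if ruolo = some "centrocampista" then (acc.1, acc.2.1, acc.2.2.1 ++ [calciatore], acc.2.2.2)
        else if ruolo = some "attaccante" then (acc.1, acc.2.1, acc.2.2.1, acc.2.2.2 ++ [calciatore])
        else acc)
      (p, d, c, a)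
    = (p ++ tabella.filter (fun x => PySem.List.pyGet? x 2 == some "portiere"),
       d ++ tabella.filter (fun x => PySem.List.pyGet? x 2 == some "difensore"),
       c ++ tabella.filter (fun x => PySem.List.pyGet? x 2 == some "centrocampista"),
       a ++ tabella.filter (fun x => PySem.List.pyGet? x 2 == some "attaccante")) := by
  induction tabella generalizing p d c a with
  | nil => simp
  | cons x t ih =>
    simp only [List.foldl_cons, List.filter_cons]
    by_cases h1 : PySem.List.pyGet? x 2 = some "portiere"
    · simp [h1, ih, List.append_assoc]
    · by_cases h2 : PySem.List.pyGet? x 2 = some "difensore"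
      · simp [h2, ih, List.append_assoc]
      · by_cases h3 : PySem.List.pyGet? x 2 = some "centrocampista"
        · simp [h3, ih, List.append_assoc]
        · by_cases h4 : PySem.List.pyGet? x 2 = some "attaccante"
          · simp [h4, ih, List.append_assoc]
          · simp [h1, h2, h3, h4, ih]

-- ===== VERDICT (by name: the statement is the Claim_ definition above) =====
theorem separa_dati_tabella_spec : Claim_equal_separa_dati_tabella := by
  intro tabella _ _
  unfold Spec_separa_dati_tabella separa_dati_tabella separa_dati_tabella_alt
  simp only [separa_fold_eq, List.nil_append, List.map]
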